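-- pv_equiv track=rewrite | github.com/AP-MI-2021/lab-3-GaleaMihai | main.py | get_longest_sublist_same_nr_div
-- ===== SOURCE A (Python) =====
-- def nr_div(num):
--     contor = 0
--     for i in range(1, num+1):
--         if num % i == 0:
--             contor += 1
--     return contor
--
-- def is_all_same_nr_div(lst):
--     """
--     Verifica daca toate elementele dintr-o lista au acelasi nr de div.
--     :param lst: lista data
--     :return: true daca da, false daca nu
--     """
--     for i in range(len(lst)):
--         for j in range(i,len(lst)):
--             if nr_div(lst[i]) != nr_div(lst[j]):
--                 return False
--     return True
--
-- def get_longest_sublist_same_nr_div(lst):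
--     """
--     Determina cea mai lunga subsecventa cu toate elementele care au acelasi nr de div.
--     :param lst: lista data
--     :return: o lista reprezentand prima cea mai lunga subsecventa
--     """
--     result = []
--     for i in range(len(lst)):
--         for j in range(i , len(lst)):
--             considered = lst[i:j+1]
--             if is_all_same_nr_div(considered):
--                 if len(considered) > len(result):
--                     result = considered
--     return result
-- ===== SOURCE B (Python) =====
-- def nr_divisors(num):
--     return len([i for i in range(1, num + 1) if num % i == 0])
--
--
-- def get_longest_sublist_same_nr_div(lst):
--     divs = [nr_divisors(x) for x in lst]
--     n = len(lst)
--     best_start = 0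
--     best_len = 0
--     i = 0
--     while i < n:
--         j = i + 1
--         while j < n and divs[j] == divs[i]:
--             j += 1
--         if j - i > best_len:
--             best_start, best_len = i, j - i
--         i = j
--     return lst[best_start:best_start + best_len]
-- ===== Notes on version B (the rewrite author's own statement) =====
-- stated objective: faster
-- what changed: B precomputes each element's divisor count once and finds the first longest run of equal counts in a single run-by-run pass, instead of A's scan of all O(n^2) contiguous sublists with a pairwise same-count check that recomputes divisor counts from scratch.
import Mathlib
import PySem

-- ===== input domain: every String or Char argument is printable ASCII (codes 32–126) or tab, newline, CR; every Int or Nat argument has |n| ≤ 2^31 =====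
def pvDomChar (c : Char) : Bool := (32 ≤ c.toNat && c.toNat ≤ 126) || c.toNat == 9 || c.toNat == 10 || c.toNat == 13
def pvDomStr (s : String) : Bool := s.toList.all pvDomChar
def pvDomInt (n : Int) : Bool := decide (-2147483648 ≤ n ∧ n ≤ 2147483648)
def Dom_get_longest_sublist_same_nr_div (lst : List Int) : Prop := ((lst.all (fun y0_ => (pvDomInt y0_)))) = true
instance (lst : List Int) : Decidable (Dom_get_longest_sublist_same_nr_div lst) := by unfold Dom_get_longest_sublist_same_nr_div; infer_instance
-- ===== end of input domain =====

-- B replaces A's scan of all O(n^2) sublists (each re-checked pairwise with nr_div recomputed from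
-- scratch) by one precomputed divisor-count list and a single pass over maximal equal-count runs.

-- ===== PORT A =====
def nr_div (num : Int) : Int :=
  (PySem.List.pyRange 1 (num + 1) 1).foldl
    (fun contor i => if PySem.Int.mod num i == 0 then contor + 1 else contor) 0

def is_all_same_nr_div (lst : List Int) : Bool :=
  (PySem.List.pyRange 0 lst.length 1).all (fun i =>
    (PySem.List.pyRange i lst.length 1).all (fun j =>
      nr_div (PySem.List.pyGetD lst i 0) == nr_div (PySem.List.pyGetD lst j 0)))

def get_longest_sublist_same_nr_div (lst : List Int) : List Int :=
  (PySem.List.pyRange 0 lst.length 1).foldl (fun result i =>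
    (PySem.List.pyRange i lst.length 1).foldl (fun result j =>
      let considered := PySem.List.slice lst (some i) (some (j + 1))
      if is_all_same_nr_div considered then
        if considered.length > result.length then considered else result
      else result) result) []

-- ===== PORT B =====
def nr_divisors (num : Int) : Int :=
  (((PySem.List.pyRange 1 (num + 1) 1).filter (fun i => PySem.Int.mod num i == 0)).length : Int)

-- inner while loop of B: length of the leading run of values equal to d0
def bRunLen (d0 : Int) : List Int → Nat
  | [] => 0
  | d :: t => if d == d0 then 1 + bRunLen d0 t else 0

-- outer while loop of B: scan run by run, keeping the first strictly-longest (start, length)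
def bScan : List Int → Nat → Nat × Nat → Nat × Nat
  | [], _, best => best
  | d :: t, i, best =>
    let r := 1 + bRunLen d t
    bScan (t.drop (bRunLen d t)) (i + r) (if r > best.2 then (i, r) else best)
termination_by l => l.length
decreasing_by simp only [List.length_cons]; exact Nat.lt_succ_of_le (by simpa using List.length_drop _ (l := t) ▸ Nat.sub_le _ _)

def get_longest_sublist_same_nr_div_alt (lst : List Int) : List Int :=
  let divs := lst.map nr_divisors
  let best := bScan divs 0 (0, 0)
  PySem.List.slice lst (some (best.1 : Int)) (some ((best.1 : Int) + (best.2 : Int)))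

-- ===== PRECONDITION & SPEC =====
def Spec_get_longest_sublist_same_nr_div (lst : List Int) (out : List Int) : Prop := out = get_longest_sublist_same_nr_div_alt lst
instance (lst : List Int) (out : List Int) : Decidable (Spec_get_longest_sublist_same_nr_div lst out) := by unfold Spec_get_longest_sublist_same_nr_div; infer_instance

-- ===== CLAIM (what is proved, stated in full; the proofs are below) =====
def Claim_equal_get_longest_sublist_same_nr_div : Prop := ∀ (lst : List Int), Dom_get_longest_sublist_same_nr_div lst → Spec_get_longest_sublist_same_nr_div lst (get_longest_sublist_same_nr_div lst)

-- ===== LEMMAS AND PROOFS =====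

-- head-run length of a list of divisor counts
def hr : List Int → Nat
  | [] => 0
  | v :: t => 1 + bRunLen v t

theorem bRunLen_le (d0 : Int) (t : List Int) : bRunLen d0 t ≤ t.length := by
  induction t with
  | nil => simp [bRunLen]
  | cons a t ih => simp only [bRunLen]; split <;> simp <;> omega


theorem hr_le (l : List Int) : hr l ≤ l.length := by
  cases l with
  | nil => simp [hr]
  | cons v t =>
    simp only [hr, List.length_cons]
    have := bRunLen_le v t; omega

theorem bRunLen_take (d0 : Int) (t : List Int) (m : Nat) :
    bRunLen d0 (t.take m) = min m (bRunLen d0 t) := by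
  induction t generalizing m with
  | nil => simp [bRunLen]
  | cons a t ih =>
    cases m with
    | zero => simp [bRunLen]
    | succ m =>
      simp only [List.take_succ_cons, bRunLen]
      split
      · simp [ih]; omega
      · simp

theorem hr_take (l : List Int) (m : Nat) : hr (l.take m) = min m (hr l) := by
  cases l with
  | nil => simp [hr]
  | cons v t =>
    cases m with
    | zero => simp [hr]
    | succ m => simp [hr, bRunLen_take]; omega

theorem bRunLen_eq_length_iff (d0 : Int) (t : List Int) :
    bRunLen d0 t = t.length ↔ ∀ u ∈ t, u = d0 := by
  induction t with
  | nil => simp [bRunLen]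
  | cons a t ih =>
    simp only [bRunLen]
    constructor
    · intro h
      by_cases ha : a = d0
      · simp only [ha, BEq.rfl, if_true, List.length_cons] at h
        have h' : bRunLen d0 t = t.length := by omega
        intro u hu
        rcases List.mem_cons.mp hu with rfl | hu
        · exact ha
        · exact ih.mp h' u hu
      · have hb : (a == d0) = false := by simp [ha]
        simp only [hb, Bool.false_eq_true, if_false, List.length_cons] at h
        omega
    · intro h
      have ha : a = d0 := h a (by simp)
      have hb : (a == d0) = true := by simp [ha]
      simp only [hb, if_true, List.length_cons]
      have := ih.mpr (fun u hu => h u (by simp [hu]))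
      omega

-- all-pairs-equal ↔ head run covers the whole list
theorem allEq_iff_hr (l : List Int) :
    (∀ u ∈ l, ∀ v ∈ l, u = v) ↔ hr l = l.length := by
  cases l with
  | nil => simp [hr]
  | cons a t =>
    simp only [hr, List.length_cons]
    rw [show (1 + bRunLen a t = t.length + 1) ↔ (bRunLen a t = t.length) by omega,
      bRunLen_eq_length_iff]
    constructor
    · intro h u hu; exact h u (by simp [hu]) a (by simp)
    · intro h u hu v hv
      rcases List.mem_cons.mp hu with rfl | hu'
      · rcases List.mem_cons.mp hv with h2 | hv'
        · rw [h2]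
        · exact (h v hv').symm
      · rcases List.mem_cons.mp hv with rfl | hv'
        · exact h u hu'
        · rw [h u hu', h v hv']

-- the Bool pairwise check of A is the all-pairs-equal property on nr_div values
theorem is_all_same_iff (l : List Int) :
    is_all_same_nr_div l = true ↔ ∀ u ∈ l.map nr_div, ∀ v ∈ l.map nr_div, u = v := by
  unfold is_all_same_nr_div
  simp only [List.all_eq_true, beq_iff_eq]
  have key : ∀ (h : ∀ i ∈ PySem.List.pyRange 0 l.length 1, ∀ j ∈ PySem.List.pyRange i l.length 1,
      nr_div (PySem.List.pyGetD l i 0) = nr_div (PySem.List.pyGetD l j 0))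
      (p q : Nat) (hp : p < l.length) (hq : q < l.length) (hpq : p ≤ q),
      nr_div l[p] = nr_div l[q] := by
    intro h p q hp hq hpq
    have := h (p : Int) (PySem.List.mem_pyRange_one.mpr ⟨by positivity, by exact_mod_cast hp⟩)
      (q : Int) (PySem.List.mem_pyRange_one.mpr ⟨by exact_mod_cast hpq, by exact_mod_cast hq⟩)
    rw [PySem.List.pyGetD_eq_getElem _ _ (by positivity) (by exact_mod_cast hp),
      PySem.List.pyGetD_eq_getElem _ _ (by positivity) (by exact_mod_cast hq)] at this
    simpa using this
  constructor
  · intro h u hu v hv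
    obtain ⟨x, hx, rfl⟩ := List.mem_map.mp hu
    obtain ⟨y, hy, rfl⟩ := List.mem_map.mp hv
    obtain ⟨p, hp, rfl⟩ := List.mem_iff_getElem.mp hx
    obtain ⟨q, hq, rfl⟩ := List.mem_iff_getElem.mp hy
    rcases le_total p q with hpq | hpq
    · exact key h p q hp hq hpq
    · exact (key h q p hq hp hpq).symm
  · intro h i hi j hj
    obtain ⟨hi0, hi1⟩ := PySem.List.mem_pyRange_one.mp hi
    obtain ⟨hj0, hj1⟩ := PySem.List.mem_pyRange_one.mp hj
    rw [PySem.List.pyGetD_eq_getElem _ _ hi0 hi1, PySem.List.pyGetD_eq_getElem _ _ (le_trans hi0 hj0) hj1]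
    exact h _ (List.mem_map.mpr ⟨_, List.getElem_mem _, rfl⟩)
      _ (List.mem_map.mpr ⟨_, List.getElem_mem _, rfl⟩)

-- characterization used for prefixes: passing ↔ length within head run
theorem is_all_same_take (suf : List Int) (m : Nat) (hm : 1 ≤ m) (hms : m ≤ suf.length) :
    is_all_same_nr_div (suf.take m) = true ↔ m ≤ hr (suf.map nr_div) := by
  rw [is_all_same_iff, List.map_take, allEq_iff_hr, hr_take, List.length_take,
    List.length_map]
  omega

-- collapse of A's inner j-loop for one start position
-- the inner fold restricted to prefixes of the suffix
theorem prefix_fold (suf : List Int) (M : Nat) (hM : M ≤ suf.length) (r : List Int) :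
    (List.range M).foldl (fun r k =>
      let c := suf.take (k + 1)
      if is_all_same_nr_div c then (if c.length > r.length then c else r) else r) r
    = (if min (hr (suf.map nr_div)) M > r.length
        then suf.take (min (hr (suf.map nr_div)) M) else r) := by
  induction M generalizing r with
  | zero => simp
  | succ M ih =>
    rw [List.range_succ, List.foldl_append]
    rw [ih (by omega)]
    simp only [List.foldl_cons, List.foldl_nil]
    set R := hr (suf.map nr_div) with hR
    have hRle : R ≤ suf.length := by
      have := hr_le (suf.map nr_div); simpa using this
    have hlen : (suf.take (M + 1)).length = M + 1 := by
      rw [List.length_take]; omega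
    by_cases hpass : M + 1 ≤ R
    · have hmin : min R M = M := by omega
      have hmin' : min R (M + 1) = M + 1 := by omega
      have hp' : is_all_same_nr_div (suf.take (M + 1)) = true :=
        (is_all_same_take suf (M + 1) (by omega) (by omega)).mpr hpass
      rw [if_pos hp', hmin, hmin', hlen]
      by_cases h1 : M > r.length
      · have hlM : (suf.take M).length = M := by rw [List.length_take]; omega
        rw [if_pos h1, hlM, if_pos (show M + 1 > M by omega),
          if_pos (show M + 1 > r.length by omega)]
      · rw [if_neg h1]
    · have hfail : is_all_same_nr_div (suf.take (M + 1)) = false := by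
        rw [Bool.eq_false_iff]
        intro hc
        exact hpass ((is_all_same_take suf (M + 1) (by omega) (by omega)).mp hc)
      rw [if_neg (by simp [hfail])]
      have : min R M = min R (M + 1) := by omega
      rw [this]

theorem inner_collapse (lst : List Int) (i : Nat) (hi : i < lst.length) (r : List Int) :
    (PySem.List.pyRange (i : Int) lst.length 1).foldl (fun result j =>
      let considered := PySem.List.slice lst (some (i : Int)) (some (j + 1))
      if is_all_same_nr_div considered then
        if considered.length > result.length then considered else result
      else result) r
    = (if hr ((lst.drop i).map nr_div) > r.length
        then (lst.drop i).take (hr ((lst.drop i).map nr_div)) else r) := by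
  rw [PySem.List.pyRange_one, List.foldl_map]
  have hsl : ∀ k : Nat, PySem.List.slice lst (some (i : Int)) (some ((i : Int) + (k : Int) + 1))
      = (lst.drop i).take (k + 1) := by
    intro k
    have : ((i : Int) + (k : Int) + 1) = (i : Int) + ((k + 1 : Nat) : Int) := by push_cast; ring
    rw [this, PySem.List.slice_natCast_add]
  have hM : ((lst.length : Int) - (i : Int)).toNat = lst.length - i := by omega
  rw [hM]
  have := prefix_fold (lst.drop i) (lst.length - i) (by simp) r
  have hmin : min (hr ((lst.drop i).map nr_div)) (lst.length - i)
      = hr ((lst.drop i).map nr_div) := by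
    have := hr_le ((lst.drop i).map nr_div)
    simp only [List.length_map, List.length_drop] at this
    omega
  rw [hmin] at this
  rw [← this]
  apply PySem.List.foldl_congr_mem
  intro acc k _
  simp only [hsl k]

-- A as a position fold with the per-start collapse applied
def stepA (lst : List Int) (r : List Int) (i : Nat) : List Int :=
  if hr ((lst.drop i).map nr_div) > r.length
    then (lst.drop i).take (hr ((lst.drop i).map nr_div)) else r

theorem A_eq_fold (lst : List Int) :
    get_longest_sublist_same_nr_div lst = (List.range lst.length).foldl (stepA lst) [] := by
  unfold get_longest_sublist_same_nr_div
  rw [PySem.List.pyRange_one, List.foldl_map]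
  have h0 : ((lst.length : Int) - 0).toNat = lst.length := by omega
  rw [h0]
  apply PySem.List.foldl_congr_mem
  intro acc k hk
  have hk' : k < lst.length := List.mem_range.mp hk
  have := inner_collapse lst k hk' acc
  simp only [zero_add]
  rw [this]
  rfl

-- run structure: hr of a dropped suffix inside a run
theorem hr_drop_one (l : List Int) (h : 2 ≤ hr l) : hr l.tail = hr l - 1 := by
  cases l with
  | nil => simp [hr] at h
  | cons v t =>
    cases t with
    | nil => simp [hr, bRunLen] at h
    | cons w t' =>
      by_cases hw : w = v
      · subst hw
        simp only [List.tail_cons, hr, bRunLen, BEq.rfl, if_true] at h ⊢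
        omega
      · have hb : (w == v) = false := by simp [hw]
        simp only [hr, bRunLen, hb, Bool.false_eq_true, if_false] at h
        omega

theorem hr_drop (l : List Int) (k : Nat) (hk : k < hr l) : hr (l.drop k) = hr l - k := by
  induction k with
  | zero => simp
  | succ k ih =>
    have h1 : hr (l.drop k) = hr l - k := ih (by omega)
    have h2 : 2 ≤ hr (l.drop k) := by omega
    have : l.drop (k + 1) = (l.drop k).tail := by
      rw [List.tail_drop]
    rw [this, hr_drop_one _ h2]; omega

-- a stretch of the A-side fold on which every step leaves the accumulator unchanged
theorem fold_id (lst : List Int) (m : Nat) : ∀ (j : Nat) (r : List Int),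
    (∀ p, j ≤ p → p < j + m → stepA lst r p = r) →
    (List.range' j m).foldl (stepA lst) r = r := by
  induction m with
  | zero => intro j r _; simp
  | succ m ih =>
    intro j r h
    rw [List.range'_succ, List.foldl_cons, h j le_rfl (by omega)]
    exact ih (j + 1) r (fun p hp1 hp2 => h p (by omega) (by omega))

-- the A-side fold over positions [i, n) computes what B's run-by-run scan computes
theorem main_loop (lst : List Int) (fuel : Nat) : ∀ i bs bl,
    fuel = lst.length - i → i ≤ lst.length → bs + bl ≤ lst.length →
    (List.range' i (lst.length - i)).foldl (stepA lst) ((lst.drop bs).take bl)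
      = ((lst.drop (bScan ((lst.map nr_div).drop i) i (bs, bl)).1).take
          (bScan ((lst.map nr_div).drop i) i (bs, bl)).2) := by
  induction fuel using Nat.strong_induction_on with
  | _ fuel IH =>
  intro i bs bl hfuel hi hbl
  by_cases hin : i < lst.length
  · have hlen_ds : (lst.map nr_div).length = lst.length := by simp
    have hdrop : (lst.map nr_div).drop i
        = (lst.map nr_div)[i]'(by omega) :: (lst.map nr_div).drop (i + 1) :=
      List.drop_eq_getElem_cons (by omega)
    set R := 1 + bRunLen ((lst.map nr_div)[i]'(by omega)) ((lst.map nr_div).drop (i + 1)) with hRdef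
    have hhr : hr ((lst.map nr_div).drop i) = R := by rw [hdrop]; rfl
    have hR1 : 1 ≤ R := by omega
    have hRle : R ≤ lst.length - i := by
      have h1 := hr_le ((lst.map nr_div).drop i)
      rw [hhr] at h1
      simp only [List.length_drop, hlen_ds] at h1
      omega
    have hscan : bScan ((lst.map nr_div).drop i) i (bs, bl)
        = bScan ((lst.map nr_div).drop (i + R)) (i + R)
            (if R > bl then (i, R) else (bs, bl)) := by
      rw [hdrop, bScan]
      have hdd : ((lst.map nr_div).drop (i + 1)).drop
          (bRunLen ((lst.map nr_div)[i]'(by omega)) ((lst.map nr_div).drop (i + 1)))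
          = (lst.map nr_div).drop (i + R) := by
        rw [List.drop_drop]
        congr 1
        omega
      rw [hdd]
    set best' : Nat × Nat := if R > bl then (i, R) else (bs, bl) with hbest'
    have hbest_le : best'.1 + best'.2 ≤ lst.length := by
      rw [hbest']
      split
      · simp; omega
      · simpa using hbl
    have hrlen : ((lst.drop bs).take bl).length = bl := by
      rw [List.length_take, List.length_drop]; omega
    have hstep : stepA lst ((lst.drop bs).take bl) i = (lst.drop best'.1).take best'.2 := by
      unfold stepA
      rw [List.map_drop, hhr, hrlen, hbest']
      split
      · simp
      · simp
    have hrlen' : ((lst.drop best'.1).take best'.2).length = best'.2 := by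
      rw [List.length_take, List.length_drop]; omega
    have hbl'R : R ≤ best'.2 ∨ ¬ R > bl := by
      rw [hbest']; by_cases h : R > bl
      · left; simp [h]
      · right; exact h
    have hbest2R : R ≤ best'.2 := by
      rw [hbest']; split
      · simp
      · simp; omega
    have hsplit : List.range' i (lst.length - i)
        = i :: (List.range' (i + 1) (R - 1) ++ List.range' (i + R) (lst.length - (i + R))) := by
      have h1 : lst.length - i = ((R - 1) + (lst.length - (i + R))) + 1 := by omega
      rw [h1, List.range'_succ]
      congr 1
      have h2 : i + 1 + 1 * (R - 1) = i + R := by omega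
      rw [← h2, List.range'_append]
    rw [hsplit, List.foldl_cons, hstep, List.foldl_append]
    have hskip : (List.range' (i + 1) (R - 1)).foldl (stepA lst)
        ((lst.drop best'.1).take best'.2) = (lst.drop best'.1).take best'.2 := by
      apply fold_id
      intro p hp1 hp2
      unfold stepA
      rw [List.map_drop]
      have hk : p - i < R := by omega
      have hpd : (lst.map nr_div).drop p = ((lst.map nr_div).drop i).drop (p - i) := by
        rw [List.drop_drop]
        congr 1
        omega
      have hhp : hr ((lst.map nr_div).drop p) = R - (p - i) := by
        rw [hpd, hr_drop _ _ (by omega)]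
        omega
      rw [hhp, hrlen']
      rw [if_neg (by omega)]
    rw [hskip, hscan]
    have := IH (lst.length - (i + R)) (by omega) (i + R) best'.1 best'.2 rfl (by omega) hbest_le
    have hbp : (best'.1, best'.2) = best' := rfl
    rw [hbp] at this
    exact this
  · have hieq : i = lst.length := by omega
    subst hieq
    have h0 : lst.length - lst.length = 0 := by omega
    rw [h0]
    have hnil : (lst.map nr_div).drop lst.length = [] :=
      List.drop_eq_nil_of_le (by simp)
    rw [hnil]
    simp [bScan]

theorem nr_divisors_eq : nr_divisors = nr_div := by
  funext num
  unfold nr_divisors nr_div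
  rw [PySem.List.foldl_if_add_one]
  simp [List.countP_eq_length_filter]

-- ===== VERDICT (by name: the statement is the Claim_ definition above) =====
theorem get_longest_sublist_same_nr_div_spec : Claim_equal_get_longest_sublist_same_nr_div := by
  intro lst _
  unfold Spec_get_longest_sublist_same_nr_div get_longest_sublist_same_nr_div_alt
  rw [A_eq_fold, nr_divisors_eq]
  have h0 : (List.range lst.length).foldl (stepA lst) []
      = (List.range' 0 lst.length).foldl (stepA lst) ((lst.drop 0).take 0) := by
    rw [List.range_eq_range']
    rfl
  rw [h0]
  have := main_loop lst lst.length 0 0 0 (by omega) (by omega) (by omega)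
  simp only [Nat.sub_zero] at this
  rw [this]
  show List.take (bScan (List.map nr_div lst) 0 (0, 0)).2
      (List.drop (bScan (List.map nr_div lst) 0 (0, 0)).1 lst)
    = PySem.List.slice lst (some ((bScan (List.map nr_div lst) 0 (0, 0)).1 : Int))
        (some (((bScan (List.map nr_div lst) 0 (0, 0)).1 : Int)
          + ((bScan (List.map nr_div lst) 0 (0, 0)).2 : Int)))
  rw [PySem.List.slice_natCast_add]
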